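-- pv_equiv track=rewrite | github.com/EthanArmbrust/randovania | randovania/games/prime/randomprime_patcher.py | compute_checksum
-- ===== SOURCE A (Python) =====
-- def compute_checksum(checksum_size, layout_number):
--     if checksum_size == 0:
--         return 0
--     s = 0
--     while layout_number > 0:
--         quotient, remainder = divmod(layout_number, 1 << checksum_size)
--         s = (s + remainder) % (1 << checksum_size)
--         layout_number = quotient
--     return s
-- ===== SOURCE B (Python) =====
-- def compute_checksum(checksum_size, layout_number):
--     if checksum_size == 0:
--         return 0
--     if layout_number <= 0:
--         return 0
--     bits = bin(layout_number)[2:]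
--     total = 0
--     for i in range(len(bits), 0, -checksum_size):
--         total += int(bits[max(0, i - checksum_size):i], 2)
--     return total % (1 << checksum_size)
-- ===== Notes on version B (the rewrite author's own statement) =====
-- stated objective: alternative
-- what changed: B converts the number to its binary string once, slices it into checksum_size-bit chunks from the right, sums the chunk values and reduces modulo 1<<checksum_size once at the end, instead of A's divmod loop that peels one base-2^k digit per iteration with a running modulus.
import Mathlib
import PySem

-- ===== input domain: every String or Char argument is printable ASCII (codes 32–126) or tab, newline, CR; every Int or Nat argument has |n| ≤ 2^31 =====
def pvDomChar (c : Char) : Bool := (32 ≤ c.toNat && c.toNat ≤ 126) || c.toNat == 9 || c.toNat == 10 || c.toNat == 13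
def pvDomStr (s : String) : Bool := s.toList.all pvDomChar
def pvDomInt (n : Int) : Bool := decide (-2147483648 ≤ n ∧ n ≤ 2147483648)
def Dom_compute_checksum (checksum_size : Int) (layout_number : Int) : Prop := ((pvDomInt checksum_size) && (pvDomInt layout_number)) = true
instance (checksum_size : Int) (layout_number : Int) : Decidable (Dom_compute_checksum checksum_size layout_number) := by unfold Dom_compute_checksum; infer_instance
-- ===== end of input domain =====

-- B reads the number as its binary string split into checksum_size-bit chunks summed once,
-- instead of A's divmod loop with a running modulus (objective: alternative decomposition).

-- ===== PORT A =====
-- the while loop of A; d is the value 1 << checksum_size (the 2 ≤ d conjunct only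
-- ensures termination: whenever the Python loop runs, d = 2^k with k ≥ 1, so 2 ≤ d)
def csLoop (d : Int) (s : Int) (ln : Int) : Int :=
  if h : 0 < ln ∧ 2 ≤ d then
    csLoop d (PySem.Int.mod (s + PySem.Int.mod ln d) d) (PySem.Int.floordiv ln d)
  else s
termination_by ln.toNat
decreasing_by
  have h1 : PySem.Int.floordiv ln d = ln / d := PySem.Int.floordiv_eq_ediv_of_pos (by omega)
  have h2 : ln / d < ln := by
    rw [Int.ediv_lt_iff_lt_mul (by omega)]
    nlinarith [h.1, h.2]
  have h3 : 0 ≤ ln / d := Int.ediv_nonneg (by omega) (by omega)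
  simp only [h1]; omega

def compute_checksum (checksum_size : Int) (layout_number : Int) : Int :=
  if checksum_size = 0 then 0
  else csLoop (2 ^ checksum_size.toNat) 0 layout_number

-- ===== PORT B =====
-- bin(m)[2:] as a list of '0'/'1' characters (most significant first)
def natToBin (m : Nat) : List Char :=
  if h : m = 0 then [] else natToBin (m / 2) ++ [if m % 2 = 1 then '1' else '0']
termination_by m
decreasing_by exact Nat.div_lt_self (Nat.pos_of_ne_zero h) (by omega)

-- int(chunk, 2)
def parseBin (cs : List Char) : Nat :=
  cs.foldl (fun a c => 2 * a + (if c = '1' then 1 else 0)) 0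

-- the for loop of B over range(len(bits), 0, -checksum_size); the slice
-- bits[max(0, i - k):i] is (bits.take i).drop (i - k) (Nat subtraction clamps at 0)
def chunkSum (bits : List Char) (k : Nat) (i : Nat) : Nat :=
  if h : 0 < i ∧ 0 < k then
    parseBin ((bits.take i).drop (i - k)) + chunkSum bits k (i - k)
  else 0
termination_by i
decreasing_by omega

def compute_checksum_alt (checksum_size : Int) (layout_number : Int) : Int :=
  if checksum_size = 0 then 0
  else if layout_number ≤ 0 then 0
  else
    let bits := natToBin layout_number.toNat
    PySem.Int.mod ((chunkSum bits checksum_size.toNat bits.length : Nat) : Int)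
      (2 ^ checksum_size.toNat)

-- ===== PRECONDITION & SPEC =====
-- Pre_ excludes only checksum_size < 0 with layout_number > 0, where BOTH A and B
-- raise ValueError at the negative shift (no input A returns on is excluded).
def Pre_compute_checksum (checksum_size : Int) (layout_number : Int) : Prop :=
  0 ≤ checksum_size ∨ layout_number ≤ 0
instance (checksum_size : Int) (layout_number : Int) : Decidable (Pre_compute_checksum checksum_size layout_number) := by unfold Pre_compute_checksum; infer_instance

def pvWitness_compute_checksum : Int × Int := (4, 12345)

def Spec_compute_checksum (checksum_size : Int) (layout_number : Int) (out : Int) : Prop := out = compute_checksum_alt checksum_size layout_number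
instance (checksum_size : Int) (layout_number : Int) (out : Int) : Decidable (Spec_compute_checksum checksum_size layout_number out) := by unfold Spec_compute_checksum; infer_instance

-- ===== CLAIM (what is proved, stated in full; the proofs are below) =====
def Claim_equal_compute_checksum : Prop := ∀ (checksum_size : Int) (layout_number : Int), Dom_compute_checksum checksum_size layout_number → Pre_compute_checksum checksum_size layout_number → Spec_compute_checksum checksum_size layout_number (compute_checksum checksum_size layout_number)

-- ===== LEMMAS AND PROOFS =====

-- sum of base-d digits of m (the common mathematical characterisation of both programs)
def digitSum (d : Nat) (m : Nat) : Nat :=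
  if h : 0 < m ∧ 2 ≤ d then m % d + digitSum d (m / d) else 0
termination_by m
decreasing_by exact Nat.div_lt_self h.1 (by omega)

-- ---- A-side: the loop computes the digit sum modulo d ----
theorem csLoop_eq (dN : Nat) (hd : 2 ≤ dN) :
    ∀ (m : Nat) (s : Int), 0 ≤ s → s < (dN : Int) →
      csLoop (dN : Int) s (m : Int) = (s + (digitSum dN m : Int)) % (dN : Int) := by
  intro m
  induction m using Nat.strong_induction_on with
  | _ m ih =>
    intro s hs0 hsd
    rcases Nat.eq_zero_or_pos m with hm | hm
    · subst hm
      simp only [Nat.cast_zero]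
      rw [csLoop, dif_neg (by omega), digitSum, dif_neg (by omega)]
      simp only [Nat.cast_zero, add_zero]
      exact (Int.emod_eq_of_lt hs0 hsd).symm
    · rw [csLoop, dif_pos (by constructor <;> [exact_mod_cast hm; exact_mod_cast hd])]
      rw [PySem.Int.mod_natCast, PySem.Int.floordiv_natCast,
          PySem.Int.mod_eq_emod_of_pos (by positivity)]
      have hlt : m / dN < m := Nat.div_lt_self hm (by omega)
      have h1 := ih (m / dN) hlt ((s + ((m % dN : Nat) : Int)) % (dN : Int))
        (Int.emod_nonneg _ (by positivity)) (Int.emod_lt_of_pos _ (by positivity))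
      rw [h1, Int.emod_add_emod]
      conv_rhs => rw [digitSum]
      rw [dif_pos (show 0 < m ∧ 2 ≤ dN from ⟨hm, hd⟩)]
      push_cast
      congr 1
      ring

-- ---- B-side: parsing ----
theorem parseBin_foldl (l : List Char) :
    ∀ a : Nat, l.foldl (fun a c => 2 * a + (if c = '1' then 1 else 0)) a
      = a * 2 ^ l.length + parseBin l := by
  induction l with
  | nil => intro a; simp [parseBin]
  | cons c t ih =>
    intro a
    simp only [List.foldl_cons, List.length_cons, parseBin] at *
    rw [ih, ih (2 * 0 + (if c = '1' then 1 else 0))]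
    ring

theorem parseBin_append (l1 l2 : List Char) :
    parseBin (l1 ++ l2) = parseBin l1 * 2 ^ l2.length + parseBin l2 := by
  have h : parseBin (l1 ++ l2)
      = l2.foldl (fun a c => 2 * a + (if c = '1' then 1 else 0)) (parseBin l1) := by
    simp [parseBin, List.foldl_append]
  rw [h, parseBin_foldl]

theorem parseBin_lt (cs : List Char) : parseBin cs < 2 ^ cs.length := by
  induction cs with
  | nil => simp [parseBin]
  | cons c t ih =>
    have h := parseBin_append [c] t
    simp only [List.singleton_append] at h
    rw [h]
    have hb : parseBin [c] ≤ 1 := by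
      simp [parseBin]; split <;> omega
    simp only [List.length_cons, pow_succ]
    nlinarith [Nat.one_le_two_pow (n := t.length)]

theorem parseBin_natToBin (m : Nat) : parseBin (natToBin m) = m := by
  induction m using Nat.strong_induction_on with
  | _ m ih =>
    rw [natToBin]
    rcases Nat.eq_zero_or_pos m with hm | hm
    · simp [hm, parseBin]
    · rw [dif_neg (by omega), parseBin_append, ih (m / 2) (Nat.div_lt_self hm (by omega))]
      have h : parseBin [if m % 2 = 1 then '1' else '0'] = m % 2 := by
        rcases Nat.mod_two_eq_zero_or_one m with h2 | h2 <;> simp [h2, parseBin]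
      simp only [List.length_singleton, h]
      omega

-- ---- B-side: the chunk loop computes the digit sum of the parsed prefix ----
theorem chunkSum_eq (bits : List Char) (k : Nat) (hk : 0 < k) :
    ∀ i, i ≤ bits.length → chunkSum bits k i = digitSum (2 ^ k) (parseBin (bits.take i)) := by
  intro i
  induction i using Nat.strong_induction_on with
  | _ i ih =>
    intro hi
    have hd2 : 2 ≤ 2 ^ k := Nat.one_lt_two_pow_iff.mpr (by omega)
    rcases Nat.eq_zero_or_pos i with h0 | h0
    · subst h0
      rw [chunkSum, dif_neg (by omega), digitSum]
      simp [parseBin]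
    · rw [chunkSum, dif_pos ⟨h0, hk⟩]
      by_cases hik : i ≤ k
      · -- single (final) chunk: i - k = 0, the chunk is the whole prefix
        have hik0 : i - k = 0 := by omega
        have hchunk : (bits.take i).drop (i - k) = bits.take i := by
          rw [hik0, List.drop_zero]
        have hrec : chunkSum bits k (i - k) = 0 := by
          rw [hik0, chunkSum, dif_neg (by omega)]
        rw [hchunk, hrec, Nat.add_zero]
        have hlt : parseBin (bits.take i) < 2 ^ k := by
          calc parseBin (bits.take i) < 2 ^ (bits.take i).length := parseBin_lt _
            _ ≤ 2 ^ k := Nat.pow_le_pow_right (by omega) (by rw [List.length_take]; omega)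
        rcases Nat.eq_zero_or_pos (parseBin (bits.take i)) with hp | hp
        · rw [hp, digitSum, dif_neg (by omega)]
        · rw [digitSum, dif_pos ⟨hp, hd2⟩, Nat.mod_eq_of_lt hlt, Nat.div_eq_of_lt hlt,
              digitSum, dif_neg (by omega), Nat.add_zero]
      · -- full chunk of k bits
        have hsplit : bits.take i = bits.take (i - k) ++ (bits.take i).drop (i - k) := by
          conv_lhs => rw [← List.take_append_drop (i - k) (bits.take i)]
          rw [List.take_take, Nat.min_eq_left (show i - k ≤ i by omega)]
        have hlen : ((bits.take i).drop (i - k)).length = k := by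
          rw [List.length_drop, List.length_take, Nat.min_eq_left hi]
          omega
        have hclt : parseBin ((bits.take i).drop (i - k)) < 2 ^ k := by
          have h := parseBin_lt ((bits.take i).drop (i - k))
          rwa [hlen] at h
        have hdec : parseBin (bits.take i)
            = 2 ^ k * parseBin (bits.take (i - k)) + parseBin ((bits.take i).drop (i - k)) := by
          conv_lhs => rw [hsplit]
          rw [parseBin_append, hlen]
          ring
        have hmod : parseBin (bits.take i) % 2 ^ k = parseBin ((bits.take i).drop (i - k)) := by
          rw [hdec, Nat.mul_add_mod, Nat.mod_eq_of_lt hclt]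
        have hdiv : parseBin (bits.take i) / 2 ^ k = parseBin (bits.take (i - k)) := by
          rw [hdec, Nat.mul_add_div (by positivity), Nat.div_eq_of_lt hclt, Nat.add_zero]
        rw [ih (i - k) (by omega) (by omega)]
        rcases Nat.eq_zero_or_pos (parseBin (bits.take i)) with hp | hp
        · -- the parsed prefix is 0: both chunks parse to 0
          have hc : parseBin ((bits.take i).drop (i - k)) = 0 := by
            rw [← hmod, hp, Nat.zero_mod]
          have ha : parseBin (bits.take (i - k)) = 0 := by
            rw [hp] at hdec
            have := hd2
            nlinarith
          rw [hp, hc, ha, digitSum, dif_neg (by omega)]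
        · conv_rhs => rw [digitSum]
          rw [dif_pos (show 0 < parseBin (bits.take i) ∧ 2 ≤ 2 ^ k from ⟨hp, hd2⟩),
              hmod, hdiv]

-- the chunk loop on the full bit string, stated on the number itself
theorem chunkSum_full (m : Nat) (k : Nat) (hk : 0 < k) :
    chunkSum (natToBin m) k (natToBin m).length = digitSum (2 ^ k) m := by
  rw [chunkSum_eq (natToBin m) k hk (natToBin m).length le_rfl,
      List.take_length, parseBin_natToBin]

theorem main_eq (k n : Int) (hpre : Pre_compute_checksum k n) :
    compute_checksum k n = compute_checksum_alt k n := by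
  unfold compute_checksum compute_checksum_alt
  by_cases hk : k = 0
  · simp [hk]
  · rw [if_neg hk, if_neg hk]
    by_cases hn : n ≤ 0
    · rw [if_pos hn, csLoop, dif_neg (fun hc => absurd hc.1 (by omega))]
    · rw [if_neg hn]
      have hk1 : 1 ≤ k.toNat := by
        rcases hpre with hk0 | hn0
        · omega
        · omega
      have hd2 : 2 ≤ 2 ^ k.toNat := Nat.one_lt_two_pow_iff.mpr (by omega)
      obtain ⟨m, rfl⟩ : ∃ m : Nat, n = (m : Int) :=
        ⟨n.toNat, (Int.toNat_of_nonneg (by omega)).symm⟩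
      have hcast : ((2 ^ k.toNat : Nat) : Int) = (2 : Int) ^ k.toNat := by push_cast; ring
      rw [← hcast, csLoop_eq (2 ^ k.toNat) hd2 m 0 le_rfl (by exact_mod_cast (by omega : 0 < 2 ^ k.toNat)),
          Int.toNat_natCast, PySem.Int.mod_natCast, chunkSum_full m k.toNat (by omega),
          zero_add]
      push_cast
      rfl

-- ===== VERDICT (by name: the statement is the Claim_ definition above) =====
theorem compute_checksum_spec : Claim_equal_compute_checksum := by
  intro k n _ hpre
  unfold Spec_compute_checksum
  exact main_eq k n hpre
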